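-- pv_equiv track=rewrite | github.com/formergen/USTxHarmsGenGUI | ustx_harms.py | generate_harmony_notes
-- ===== SOURCE A (Python) =====
-- def get_scale_intervals(key_tone_index, mode):
--     major_intervals = [0, 2, 4, 5, 7, 9, 11]
--     minor_intervals = [0, 2, 3, 5, 7, 8, 10]
--
--     key_tone = key_tone_index
--
--     if mode == "major":
--         return [(key_tone + interval) % 12 for interval in major_intervals]
--     elif mode == "minor":
--         return [(key_tone + interval) % 12 for interval in minor_intervals]
--     return []
--
-- def is_note_in_key(note_tone, key_tone_index, mode):
--     scale_intervals = get_scale_intervals(key_tone_index, mode)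
--     note_class = note_tone % 12
--     return note_class in scale_intervals
--
-- def generate_harmony_notes(original_notes_for_track, semitone_interval, harmony_type, key_tone_index, key_mode):
--     harmony_tracks_notes = []
--
--     if harmony_type in (1, 3):
--         lower_harmony_notes = []
--         for note in original_notes_for_track:
--             harmony_tone = note['tone'] - semitone_interval
--             original_tone = harmony_tone
--
--             correction_attempts = 0
--             while not is_note_in_key(harmony_tone, key_tone_index, key_mode) and correction_attempts < 3:
--                 harmony_tone += 1
--                 correction_attempts += 1
--
--             if not is_note_in_key(harmony_tone, key_tone_index, key_mode):
--                 harmony_tone = original_tone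
--
--             lower_harmony_notes.append({**note, 'tone': harmony_tone})
--         harmony_tracks_notes.append(lower_harmony_notes)
--
--     if harmony_type in (2, 3):
--         upper_harmony_notes = []
--         for note in original_notes_for_track:
--             harmony_tone = note['tone'] + semitone_interval
--             original_tone = harmony_tone
--
--             correction_attempts = 0
--             while not is_note_in_key(harmony_tone, key_tone_index, key_mode) and correction_attempts < 3:
--                 harmony_tone -= 1
--                 correction_attempts += 1
--
--             if not is_note_in_key(harmony_tone, key_tone_index, key_mode):
--                 harmony_tone = original_tone
--
--             upper_harmony_notes.append({**note, 'tone': harmony_tone})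
--         harmony_tracks_notes.append(upper_harmony_notes)
--
--     return harmony_tracks_notes
-- ===== SOURCE B (Python) =====
-- def generate_harmony_notes(original_notes_for_track, semitone_interval, harmony_type, key_tone_index, key_mode):
--     if key_mode == "major":
--         intervals = [0, 2, 4, 5, 7, 9, 11]
--     elif key_mode == "minor":
--         intervals = [0, 2, 3, 5, 7, 8, 10]
--     else:
--         intervals = []
--     scale = {(key_tone_index + i) % 12 for i in intervals}
--
--     def offset(c, step):
--         for k in range(4):
--             if (c + k * step) % 12 in scale:
--                 return k * step
--         return 0
--
--     lower_off = [offset(c, 1) for c in range(12)]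
--     upper_off = [offset(c, -1) for c in range(12)]
--
--     tracks = []
--     if harmony_type in (1, 3):
--         tracks.append([{**note, 'tone': (note['tone'] - semitone_interval)
--                         + lower_off[(note['tone'] - semitone_interval) % 12]}
--                        for note in original_notes_for_track])
--     if harmony_type in (2, 3):
--         tracks.append([{**note, 'tone': (note['tone'] + semitone_interval)
--                         + upper_off[(note['tone'] + semitone_interval) % 12]}
--                        for note in original_notes_for_track])
--     return tracks
-- ===== Notes on version B (the rewrite author's own statement) =====
-- stated objective: alternative
-- what changed: B precomputes the scale set and two 12-entry pitch-class correction tables once and emits each harmony note with a single table lookup, replacing A's per-note correction while-loop that rebuilds the scale list on every is_note_in_key call; dict-copy cost dominates, so measured runtime is the same.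
import Mathlib
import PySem

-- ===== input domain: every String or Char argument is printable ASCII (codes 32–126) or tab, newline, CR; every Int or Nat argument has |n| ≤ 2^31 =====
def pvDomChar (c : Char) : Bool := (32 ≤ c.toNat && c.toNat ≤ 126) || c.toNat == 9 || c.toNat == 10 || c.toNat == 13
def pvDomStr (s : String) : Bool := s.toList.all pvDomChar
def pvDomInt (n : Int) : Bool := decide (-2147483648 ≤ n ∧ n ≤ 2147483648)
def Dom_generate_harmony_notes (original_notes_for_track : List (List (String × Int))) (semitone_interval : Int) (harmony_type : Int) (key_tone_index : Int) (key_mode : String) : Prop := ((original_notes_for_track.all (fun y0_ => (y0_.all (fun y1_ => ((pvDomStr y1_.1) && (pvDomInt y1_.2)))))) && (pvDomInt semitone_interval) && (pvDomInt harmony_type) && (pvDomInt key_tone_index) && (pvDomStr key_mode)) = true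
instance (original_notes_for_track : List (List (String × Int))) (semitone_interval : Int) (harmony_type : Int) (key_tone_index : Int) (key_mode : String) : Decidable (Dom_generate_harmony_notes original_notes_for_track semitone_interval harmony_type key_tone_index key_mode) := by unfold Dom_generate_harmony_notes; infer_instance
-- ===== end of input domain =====

-- B replaces A's per-note scale-search while-loop by a scale set and two 12-entry pitch-class
-- correction tables built once, then a single table lookup per note (same measured cost;
-- return values only, neither version mutates its arguments).

-- ===== PORT A =====
-- get_scale_intervals
def pyScaleIntervals (key_tone_index : Int) (mode : String) : List Int :=
  if mode = "major" then [0, 2, 4, 5, 7, 9, 11].map (fun i => PySem.Int.mod (key_tone_index + i) 12)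
  else if mode = "minor" then [0, 2, 3, 5, 7, 8, 10].map (fun i => PySem.Int.mod (key_tone_index + i) 12)
  else []

-- is_note_in_key
def pyIsNoteInKey (note_tone key_tone_index : Int) (mode : String) : Bool :=
  (pyScaleIntervals key_tone_index mode).contains (PySem.Int.mod note_tone 12)

-- the 'while not is_note_in_key(...) and correction_attempts < 3' loop (step = +1 lower / -1 upper)
def pyCorrect (key_tone_index : Int) (mode : String) (step : Int) (t : Int) (attempts : Nat) : Int :=
  if ¬ (pyIsNoteInKey t key_tone_index mode = true) ∧ attempts < 3 then
    pyCorrect key_tone_index mode step (t + step) (attempts + 1)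
  else t
termination_by 3 - attempts

-- the loop followed by the revert-to-original_tone check (per-note body of A)
def pyHarmTone (key_tone_index : Int) (mode : String) (step : Int) (original_tone : Int) : Int :=
  let t := pyCorrect key_tone_index mode step original_tone 0
  if ¬ (pyIsNoteInKey t key_tone_index mode = true) then original_tone else t

def generate_harmony_notes (original_notes_for_track : List (List (String × Int))) (semitone_interval : Int) (harmony_type : Int) (key_tone_index : Int) (key_mode : String) : List (List (List (String × Int))) :=
  (if harmony_type = 1 ∨ harmony_type = 3 then
    [original_notes_for_track.foldl (fun acc note =>
      acc ++ [(let d := PySem.Dict.ofList note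
               -- note['tone']: Pre_ guarantees the key is present (Python raises KeyError otherwise)
               let tone := (d.get? "tone").getD 0
               (d.insert "tone" (pyHarmTone key_tone_index key_mode 1 (tone - semitone_interval))).items)]) []]
  else []) ++
  (if harmony_type = 2 ∨ harmony_type = 3 then
    [original_notes_for_track.foldl (fun acc note =>
      acc ++ [(let d := PySem.Dict.ofList note
               let tone := (d.get? "tone").getD 0
               (d.insert "tone" (pyHarmTone key_tone_index key_mode (-1) (tone + semitone_interval))).items)]) []]
  else [])

-- ===== PORT B =====
def altIntervals (mode : String) : List Int :=
  if mode = "major" then [0, 2, 4, 5, 7, 9, 11]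
  else if mode = "minor" then [0, 2, 3, 5, 7, 8, 10]
  else []

-- the scale pitch-class set, built once
def altScale (key_tone_index : Int) (mode : String) : PySem.Set Int :=
  PySem.Set.ofList ((altIntervals mode).map (fun i => PySem.Int.mod (key_tone_index + i) 12))

-- 'for k in range(4): if (c + k*step) % 12 in scale: return k*step' … 'return 0'
def altOffset (scale : PySem.Set Int) (c step : Int) : Int :=
  ((((PySem.List.pyRange 0 4 1).find?
      (fun k => PySem.Set.contains scale (PySem.Int.mod (c + k * step) 12))).map
    (fun k => k * step)).getD 0)

def generate_harmony_notes_alt (original_notes_for_track : List (List (String × Int))) (semitone_interval : Int) (harmony_type : Int) (key_tone_index : Int) (key_mode : String) : List (List (List (String × Int))) :=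
  let scale := altScale key_tone_index key_mode
  let lower_off := (PySem.List.pyRange 0 12 1).map (fun c => altOffset scale c 1)
  let upper_off := (PySem.List.pyRange 0 12 1).map (fun c => altOffset scale c (-1))
  (if harmony_type = 1 ∨ harmony_type = 3 then
    [original_notes_for_track.map (fun note =>
      let d := PySem.Dict.ofList note
      let t := (d.get? "tone").getD 0 - semitone_interval   -- Pre_ guarantees the key is present
      (d.insert "tone" (t + (PySem.List.pyGet? lower_off (PySem.Int.mod t 12)).getD 0)).items)]
  else []) ++
  (if harmony_type = 2 ∨ harmony_type = 3 then
    [original_notes_for_track.map (fun note =>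
      let d := PySem.Dict.ofList note
      let t := (d.get? "tone").getD 0 + semitone_interval
      (d.insert "tone" (t + (PySem.List.pyGet? upper_off (PySem.Int.mod t 12)).getD 0)).items)]
  else [])

-- ===== PRECONDITION & SPEC =====
-- Pre_ excludes only inputs on which Python (A and B alike) raises KeyError: a note without the
-- 'tone' key while harmony_type actually selects a harmony block (1, 2 or 3).
def Pre_generate_harmony_notes (original_notes_for_track : List (List (String × Int))) (semitone_interval : Int) (harmony_type : Int) (key_tone_index : Int) (key_mode : String) : Prop :=
  (harmony_type = 1 ∨ harmony_type = 2 ∨ harmony_type = 3) →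
    ∀ note ∈ original_notes_for_track, "tone" ∈ note.map Prod.fst
instance (original_notes_for_track : List (List (String × Int))) (semitone_interval : Int) (harmony_type : Int) (key_tone_index : Int) (key_mode : String) : Decidable (Pre_generate_harmony_notes original_notes_for_track semitone_interval harmony_type key_tone_index key_mode) := by unfold Pre_generate_harmony_notes; infer_instance

def pvWitness_generate_harmony_notes : (List (List (String × Int))) × Int × Int × Int × String :=
  ([[("tone", 60)], [("tone", 64), ("length", 480)]], 7, 3, 0, "major")

def Spec_generate_harmony_notes (original_notes_for_track : List (List (String × Int))) (semitone_interval : Int) (harmony_type : Int) (key_tone_index : Int) (key_mode : String) (out : List (List (List (String × Int)))) : Prop := out = generate_harmony_notes_alt original_notes_for_track semitone_interval harmony_type key_tone_index key_mode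
instance (original_notes_for_track : List (List (String × Int))) (semitone_interval : Int) (harmony_type : Int) (key_tone_index : Int) (key_mode : String) (out : List (List (List (String × Int)))) : Decidable (Spec_generate_harmony_notes original_notes_for_track semitone_interval harmony_type key_tone_index key_mode out) := by unfold Spec_generate_harmony_notes; infer_instance

-- ===== CLAIM (what is proved, stated in full; the proofs are below) =====
def Claim_equal_generate_harmony_notes : Prop := ∀ (original_notes_for_track : List (List (String × Int))) (semitone_interval : Int) (harmony_type : Int) (key_tone_index : Int) (key_mode : String), Dom_generate_harmony_notes original_notes_for_track semitone_interval harmony_type key_tone_index key_mode → Pre_generate_harmony_notes original_notes_for_track semitone_interval harmony_type key_tone_index key_mode → Spec_generate_harmony_notes original_notes_for_track semitone_interval harmony_type key_tone_index key_mode (generate_harmony_notes original_notes_for_track semitone_interval harmony_type key_tone_index key_mode)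

-- ===== LEMMAS AND PROOFS =====

-- indexing one of B's 12-entry tables at a pitch class hits exactly the generating function
theorem table_lookup (f : Int → Int) (r : Int) (h0 : 0 ≤ r) (h12 : r < 12) :
    (PySem.List.pyGet? ((PySem.List.pyRange 0 12 1).map f) r).getD 0 = f r := by
  have hr : PySem.List.pyRange 0 12 1 = [0,1,2,3,4,5,6,7,8,9,10,11] := by decide
  rw [hr]
  interval_cases r <;> rfl

-- A's bounded correction loop + revert equals tone + B's table offset for that pitch class
theorem off_eq (key : Int) (mode : String) (step t : Int) :
    pyHarmTone key mode step t = t + altOffset (altScale key mode) (PySem.Int.mod t 12) step := by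
  have hmod : ∀ x : Int, PySem.Int.mod (PySem.Int.mod t 12 + x) 12 = PySem.Int.mod (t + x) 12 := by
    intro x
    simp only [PySem.Int.mod_eq_emod_of_pos (by norm_num : (0:Int) < 12)]
    omega
  have hcon : ∀ y : Int, PySem.Set.contains (altScale key mode) (PySem.Int.mod y 12) = pyIsNoteInKey y key mode := by
    intro y
    unfold pyIsNoteInKey altScale
    have hl : pyScaleIntervals key mode = (altIntervals mode).map (fun i => PySem.Int.mod (key + i) 12) := by
      unfold pyScaleIntervals altIntervals; split_ifs <;> rfl
    rw [hl]
    by_cases hx : PySem.Int.mod y 12 ∈ (altIntervals mode).map (fun i => PySem.Int.mod (key + i) 12) <;>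
      simp [PySem.Set.mem_ofList, hx]
  have hpr : PySem.List.pyRange 0 4 1 = [0,1,2,3] := by decide
  unfold altOffset
  rw [hpr]
  simp only [List.find?, hmod, hcon]
  by_cases h0 : pyIsNoteInKey (t + 0 * step) key mode = true <;>
  by_cases h1 : pyIsNoteInKey (t + 1 * step) key mode = true <;>
  by_cases h2 : pyIsNoteInKey (t + 2 * step) key mode = true <;>
  by_cases h3 : pyIsNoteInKey (t + 3 * step) key mode = true <;>
  all_goals (
    have h0' := h0; have h1' := h1; have h2' := h2; have h3' := h3
    rw [show t + 0 * step = t from by ring] at h0'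
    rw [show t + 1 * step = t + step from by ring] at h1'
    rw [show t + 2 * step = t + step + step from by ring] at h2'
    rw [show t + 3 * step = t + step + step + step from by ring] at h3'
    simp [pyHarmTone, pyCorrect, h0, h1, h2, h3, h0', h1', h2', h3']
    try ring)

-- per-note body equality: A's corrected tone = B's table lookup
theorem note_eq (key : Int) (mode : String) (step t : Int) :
    pyHarmTone key mode step t
    = t + (PySem.List.pyGet?
        ((PySem.List.pyRange 0 12 1).map (fun c => altOffset (altScale key mode) c step))
        (PySem.Int.mod t 12)).getD 0 := by
  rw [table_lookup _ _ (PySem.Int.mod_nonneg t (by norm_num)) (PySem.Int.mod_lt t (by norm_num))]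
  exact off_eq key mode step t

-- ===== VERDICT (by name: the statement is the Claim_ definition above) =====
theorem generate_harmony_notes_spec : Claim_equal_generate_harmony_notes := by
  intro notes si ht kt km _ _
  unfold Spec_generate_harmony_notes generate_harmony_notes generate_harmony_notes_alt
  rw [PySem.List.foldl_append_singleton_eq_map, PySem.List.foldl_append_singleton_eq_map]
  congr 1 <;> split_ifs <;> try rfl
  all_goals (
    simp only [List.nil_append, List.cons.injEq, and_true, List.map_inj_left]
    intro note _
    rw [note_eq])
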